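-- pv_equiv track=rewrite | github.com/Thormes/advent-of-code | 2024/day9/day9_solution.py | map_free_spaces
-- ===== SOURCE A (Python) =====
-- def map_free_spaces(content: list):
--     spaces = {}
--     count = 0
--     pos = 0
--     for i in range(len(content)):
--         if content[i] == '.':
--             count += 1
--         else:
--             if count > 0:
--                 spaces[pos] = count
--             count = 0
--             pos = i + 1
--
--     return spaces
-- ===== SOURCE B (Python) =====
-- def map_free_spaces(content: list):
--     # Run-based two-pointer scan: find each maximal run of equal class
--     # ('.' vs non-'.') at once, record dot-runs that end before the list does.
--     spaces = {}
--     pos = 0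
--     rest = content
--     while rest:
--         is_dot = rest[0] == '.'
--         k = 0
--         while k < len(rest) and (rest[k] == '.') == is_dot:
--             k += 1
--         if is_dot and k < len(rest):
--             spaces[pos] = k
--         pos += k
--         rest = rest[k:]
--     return spaces
-- ===== Notes on version B (the rewrite author's own statement) =====
-- stated objective: alternative
-- what changed: Replaces A's per-element state machine (count/pos registers reset at every non-dot) by a run-based two-pointer scan that locates each maximal run of equal class at once and records a dot-run exactly when it ends before the list does.
import Mathlib
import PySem

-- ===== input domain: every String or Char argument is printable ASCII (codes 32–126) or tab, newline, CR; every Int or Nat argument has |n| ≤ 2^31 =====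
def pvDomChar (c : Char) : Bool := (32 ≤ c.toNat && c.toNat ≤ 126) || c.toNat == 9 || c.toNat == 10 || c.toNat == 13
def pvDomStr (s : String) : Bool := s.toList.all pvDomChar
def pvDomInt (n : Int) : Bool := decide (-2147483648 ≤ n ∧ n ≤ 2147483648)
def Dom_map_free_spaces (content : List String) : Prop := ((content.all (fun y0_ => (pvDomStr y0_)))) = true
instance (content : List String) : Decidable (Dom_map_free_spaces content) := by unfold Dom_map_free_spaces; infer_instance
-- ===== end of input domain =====

-- B replaces A's per-element count/pos state machine by a run-based scan that
-- consumes each maximal run of '.'/non-'.' at once (alternative decomposition, same cost).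


-- ===== PORT A =====
-- loop body of A: state (spaces, count, pos), element (i, content[i])
def stepA (st : PySem.Dict Int Int × Int × Int) (p : Int × String) :
    PySem.Dict Int Int × Int × Int :=
  if p.2 == "." then (st.1, st.2.1 + 1, st.2.2)
  else ((if st.2.1 > 0 then st.1.insert st.2.2 st.2.1 else st.1), 0, p.1 + 1)

-- 'for i in range(len(content)): … content[i] …' reads (i, content[i]) in order = enumerate
def map_free_spaces (content : List String) : List (Int × Int) :=
  ((PySem.List.enumerate content 0).foldl stepA (PySem.Dict.empty, 0, 0)).1.items

-- ===== PORT B =====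
-- inner 'while k < len(rest) and (rest[k] == ".") == is_dot: k += 1' of Source B,
-- ported structurally over the list it scans (exact: counts the maximal matching prefix)
def runLen (isDot : Bool) : List String → Nat
  | [] => 0
  | c :: cs => if (c == ".") == isDot then runLen isDot cs + 1 else 0

-- outer 'while rest:' loop of Source B
def altGo : List String → Int → PySem.Dict Int Int → PySem.Dict Int Int
  | [], _, spaces => spaces
  | c :: cs, pos, spaces =>
    altGo ((c :: cs).drop (runLen (c == ".") (c :: cs)))
          (pos + (runLen (c == ".") (c :: cs) : Int))
          (if (c == ".") && decide (runLen (c == ".") (c :: cs) < (c :: cs).length)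
             then spaces.insert pos (runLen (c == ".") (c :: cs)) else spaces)
termination_by rest _ _ => rest.length
decreasing_by
  simp only [List.length_drop, runLen, beq_self_eq_true, if_true, List.length_cons]
  omega

def map_free_spaces_alt (content : List String) : List (Int × Int) :=
  (altGo content 0 PySem.Dict.empty).items

-- ===== PRECONDITION & SPEC =====
def Spec_map_free_spaces (content : List String) (out : List (Int × Int)) : Prop := out = map_free_spaces_alt content
instance (content : List String) (out : List (Int × Int)) : Decidable (Spec_map_free_spaces content out) := by unfold Spec_map_free_spaces; infer_instance

-- ===== CLAIM (what is proved, stated in full; the proofs are below) =====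
def Claim_equal_map_free_spaces : Prop := ∀ (content : List String), Dom_map_free_spaces content → Spec_map_free_spaces content (map_free_spaces content)

-- ===== LEMMAS AND PROOFS =====

-- runLen is the length of the maximal matching prefix
lemma runLen_eq_takeWhile (b : Bool) (l : List String) :
    runLen b l = (l.takeWhile (fun x => (x == ".") == b)).length := by
  induction l with
  | nil => rfl
  | cons c cs ih =>
    by_cases h : ((c == ".") == b) = true <;>
      simp [runLen, List.takeWhile, h, ih]

-- A's fold across a block of dots only bumps count
lemma foldA_dots (l : List String) (h : ∀ x ∈ l, (x == ".") = true) :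
    ∀ (j : Int) (sp : PySem.Dict Int Int) (cnt pos : Int),
      (PySem.List.enumerate l j).foldl stepA (sp, cnt, pos) = (sp, cnt + l.length, pos) := by
  induction l with
  | nil => intro j sp cnt pos; simp [PySem.List.enumerate_nil]
  | cons c cs ih =>
    intro j sp cnt pos
    have hc : (c == ".") = true := h c (by simp)
    have hcs : ∀ x ∈ cs, (x == ".") = true := fun x hx => h x (by simp [hx])
    simp only [PySem.List.enumerate_cons, List.foldl_cons, stepA, hc, if_true]
    rw [ih hcs]
    simp only [Prod.mk.injEq, List.length_cons]
    refine ⟨?_, ?_, ?_⟩ <;> first | trivial | (push_cast; ring)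

-- A's fold across a block of non-dots (with count = 0) only moves pos to the next index
lemma foldA_nondots (l : List String) (h : ∀ x ∈ l, (x == ".") = false) :
    ∀ (j : Int) (sp : PySem.Dict Int Int),
      (PySem.List.enumerate l j).foldl stepA (sp, 0, j) = (sp, 0, j + l.length) := by
  induction l with
  | nil => intro j sp; simp [PySem.List.enumerate_nil]
  | cons c cs ih =>
    intro j sp
    have hc : (c == ".") = false := h c (by simp)
    have hcs : ∀ x ∈ cs, (x == ".") = false := fun x hx => h x (by simp [hx])
    simp only [PySem.List.enumerate_cons, List.foldl_cons, stepA, hc, Bool.false_eq_true,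
      if_false, lt_self_iff_false, List.length_cons]
    rw [ih hcs]
    simp only [Prod.mk.injEq]
    refine ⟨?_, ?_, ?_⟩ <;> first | trivial | (push_cast; ring)

lemma head_dropWhile_false {p : String → Bool} {l : List String} {d : String} {ds : List String}
    (h : l.dropWhile p = d :: ds) : p d = false := by
  induction l with
  | nil => simp at h
  | cons c cs ih =>
    by_cases hc : p c = true
    · exact ih (by simpa [List.dropWhile, hc] using h)
    · simp only [List.dropWhile, Bool.not_eq_true] at *
      rw [hc] at h
      simp at h
      rw [← h.1]
      simpa using hc

-- main invariant: A's fold from a run boundary (count = 0, pos = current index) computes altGo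
lemma main_inv : ∀ (n : Nat) (rest : List String), rest.length ≤ n →
    ∀ (j : Int) (sp : PySem.Dict Int Int),
      ((PySem.List.enumerate rest j).foldl stepA (sp, 0, j)).1 = altGo rest j sp := by
  intro n
  induction n with
  | zero =>
    intro rest hlen j sp
    have : rest = [] := List.eq_nil_of_length_eq_zero (by omega)
    subst this
    simp [PySem.List.enumerate_nil, altGo]
  | succ m ih =>
    intro rest hlen j sp
    match rest with
    | [] => simp [PySem.List.enumerate_nil, altGo]
    | c :: cs =>
      have hk : runLen (c == ".") (c :: cs) =
          ((c :: cs).takeWhile (fun x => (x == ".") == (c == "."))).length :=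
        runLen_eq_takeWhile _ _
      have hsplit : (c :: cs).takeWhile (fun x => (x == ".") == (c == ".")) ++
          (c :: cs).dropWhile (fun x => (x == ".") == (c == ".")) = c :: cs :=
        List.takeWhile_append_dropWhile
      have htw : ∀ x ∈ (c :: cs).takeWhile (fun x => (x == ".") == (c == ".")),
          ((x == ".") == (c == ".")) = true := fun x hx =>
        List.mem_takeWhile_imp (p := fun x => (x == ".") == (c == ".")) hx
      have hk1 : 1 ≤ runLen (c == ".") (c :: cs) := by simp [runLen]
      have hdrop : (c :: cs).drop (runLen (c == ".") (c :: cs)) =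
          (c :: cs).dropWhile (fun x => (x == ".") == (c == ".")) := by
        rw [hk]
        have h2 := List.drop_left
          (l₁ := (c :: cs).takeWhile (fun x => (x == ".") == (c == ".")))
          (l₂ := (c :: cs).dropWhile (fun x => (x == ".") == (c == ".")))
        rw [hsplit] at h2
        exact h2
      have hlen2 : ((c :: cs).takeWhile (fun x => (x == ".") == (c == "."))).length +
          ((c :: cs).dropWhile (fun x => (x == ".") == (c == "."))).length = cs.length + 1 := by
        have h6 := congrArg List.length hsplit
        simp only [List.length_append, List.length_cons] at h6
        exact h6
      have henum : PySem.List.enumerate (c :: cs) j =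
          PySem.List.enumerate ((c :: cs).takeWhile (fun x => (x == ".") == (c == "."))) j ++
          PySem.List.enumerate ((c :: cs).dropWhile (fun x => (x == ".") == (c == ".")))
            (j + ((c :: cs).takeWhile (fun x => (x == ".") == (c == "."))).length) := by
        have h3 := PySem.List.enumerate_append
          (xs := (c :: cs).takeWhile (fun x => (x == ".") == (c == ".")))
          (ys := (c :: cs).dropWhile (fun x => (x == ".") == (c == ".")))
          (s := j)
        rw [hsplit] at h3
        exact h3
      have hktw : 1 ≤ ((c :: cs).takeWhile (fun x => (x == ".") == (c == "."))).length := by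
        rw [← hk]; exact hk1
      rw [altGo, henum, List.foldl_append, hdrop, hk]
      by_cases hbv : (c == ".") = true
      · -- dot run
        have hdots : ∀ x ∈ (c :: cs).takeWhile (fun x => (x == ".") == (c == ".")),
            (x == ".") = true := by
          intro x hx; have := htw x hx; rw [hbv] at this; simpa using this
        rw [foldA_dots _ hdots]
        cases hdw : (c :: cs).dropWhile (fun x => (x == ".") == (c == ".")) with
        | nil =>
          have hklen : ¬ (((c :: cs).takeWhile (fun x => (x == ".") == (c == "."))).length
              < (c :: cs).length) := by
            rw [hdw] at hlen2
            simp only [List.length_nil, Nat.add_zero] at hlen2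
            simp only [hlen2, List.length_cons]
            omega
          have hguard : (c == "." &&
              decide (((c :: cs).takeWhile (fun x => (x == ".") == (c == "."))).length
                < (c :: cs).length)) = false := by
            rw [decide_eq_false hklen, Bool.and_false]
          simp only [PySem.List.enumerate_nil, List.foldl_nil, hguard,
            Bool.false_eq_true, if_false, altGo]
        | cons d ds =>
          have hd : (d == ".") = false := by
            have := head_dropWhile_false hdw
            rw [hbv] at this; simpa using this
          have h6 := hlen2
          rw [hdw] at h6
          have hklen : ((c :: cs).takeWhile (fun x => (x == ".") == (c == "."))).length
              < (c :: cs).length := by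
            simp only [List.length_cons] at h6 ⊢
            omega
          have hds : (d :: ds).length ≤ m := by
            simp only [List.length_cons] at h6 hlen ⊢
            omega
          have hfold := ih (d :: ds) hds
            (j + ((c :: cs).takeWhile (fun x => (x == ".") == (c == "."))).length)
            (sp.insert j (((c :: cs).takeWhile (fun x => (x == ".") == (c == "."))).length))
          have hguard : (c == "." &&
              decide (((c :: cs).takeWhile (fun x => (x == ".") == (c == "."))).length
                < (c :: cs).length)) = true := by
            rw [decide_eq_true hklen, Bool.and_true]; exact hbv
          rw [if_pos hguard, ← hfold]
          simp [stepA, hd]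
      · -- non-dot run
        have hbf : (c == ".") = false := by simpa using hbv
        have hnd : ∀ x ∈ (c :: cs).takeWhile (fun x => (x == ".") == (c == ".")),
            (x == ".") = false := by
          intro x hx; have := htw x hx; rw [hbf] at this; simpa using this
        rw [foldA_nondots _ hnd]
        have hguard : (c == "." &&
            decide (((c :: cs).takeWhile (fun x => (x == ".") == (c == "."))).length
              < (c :: cs).length)) = false := by
          rw [hbf, Bool.false_and]
        simp only [hguard, Bool.false_eq_true, if_false]
        apply ih
        simp only [List.length_cons] at hlen hlen2 ⊢
        omega

-- ===== VERDICT (by name: the statement is the Claim_ definition above) =====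
theorem map_free_spaces_spec : Claim_equal_map_free_spaces := by
  intro content _
  unfold Spec_map_free_spaces map_free_spaces map_free_spaces_alt
  rw [main_inv content.length content (le_refl _) 0 PySem.Dict.empty]
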